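-- pv_equiv track=rewrite | github.com/kyooon6248/Algorithm_on_Programmers | 프로그래머스/unrated/181881. 조건에 맞게 수열 변환하기 2/조건에 맞게 수열 변환하기 2.py | solution
-- ===== SOURCE A (Python) =====
-- def solution(arr):
--     x = 0
--     while True:
--         prev_arr = arr.copy()
--         for i, num in enumerate(arr): # 값 바꿔주기
--             if num>=50 and num%2==0:
--                 arr[i] = num//2
--             elif num<50 and num%2==1:
--                 arr[i] = 2*num+1
--         if arr == prev_arr:
--             return x
--         x += 1
-- ===== SOURCE B (Python) =====
-- def solution(arr):
--     best = 0
--     for num in arr: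
--         c = 0
--         while True:
--             if num >= 50 and num % 2 == 0:
--                 nxt = num // 2
--             elif num < 50 and num % 2 == 1:
--                 nxt = 2 * num + 1
--             else:
--                 nxt = num
--             if nxt == num:
--                 break
--             num = nxt
--             c += 1
--         if c > best:
--             best = c
--     return best
-- ===== Notes on version B (the rewrite author's own statement) =====
-- stated objective: alternative
-- what changed: Instead of repeatedly rewriting and comparing whole array copies round by round until a round changes nothing, B follows each element's transformation chain independently once and returns the maximum chain length.
import Mathlib
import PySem

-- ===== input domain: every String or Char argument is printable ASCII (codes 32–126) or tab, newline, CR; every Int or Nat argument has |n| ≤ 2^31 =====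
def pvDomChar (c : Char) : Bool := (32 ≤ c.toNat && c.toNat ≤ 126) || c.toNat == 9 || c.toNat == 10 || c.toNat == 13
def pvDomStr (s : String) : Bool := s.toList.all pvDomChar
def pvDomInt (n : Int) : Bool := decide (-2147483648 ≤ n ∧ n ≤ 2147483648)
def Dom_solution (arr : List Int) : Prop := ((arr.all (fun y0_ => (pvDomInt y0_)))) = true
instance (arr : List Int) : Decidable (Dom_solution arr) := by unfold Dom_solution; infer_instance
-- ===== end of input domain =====

-- B replaces A's round-by-round whole-array rewriting (with a copy and comparison per
-- round) by one independent walk down each element's transformation chain, returning the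
-- maximum chain length. A mutates its argument in place (B does not); the equivalence
-- proved here is about the return value only.

-- ===== PORT A =====
-- one parallel round: 'for i, num in enumerate(arr)' writes only index i before reading
-- i+1, so the in-place pass is exactly a pointwise map
def pvStep (n : Int) : Int :=
  if 50 ≤ n ∧ PySem.Int.mod n 2 = 0 then PySem.Int.floordiv n 2
  else if n < 50 ∧ PySem.Int.mod n 2 = 1 then 2 * n + 1
  else n

-- the 'while True' loop; the fuel argument only makes it total (it is never exhausted on
-- inputs satisfying Pre_solution ∧ Dom_solution, as the proof below shows)
def pvLoopA (fuel : Nat) (arr : List Int) (x : Int) : Int :=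
  if fuel = 0 then x
  else
    let prev := arr
    let arr' := arr.map pvStep
    if arr' = prev then x else pvLoopA (fuel - 1) arr' (x + 1)
  termination_by fuel
  decreasing_by omega

def pvFuel : Nat := 2147483648 + 64

def solution (arr : List Int) : Int := pvLoopA pvFuel arr 0

-- ===== PORT B =====
-- the inner 'while' of B, fuel only for totality (never exhausted inside Pre_ ∧ Dom_)
def pvChain (fuel : Nat) (num : Int) (c : Int) : Int :=
  if fuel = 0 then c
  else
    let nxt :=
      if 50 ≤ num ∧ PySem.Int.mod num 2 = 0 then PySem.Int.floordiv num 2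
      else if num < 50 ∧ PySem.Int.mod num 2 = 1 then 2 * num + 1
      else num
    if nxt = num then c else pvChain (fuel - 1) nxt (c + 1)
  termination_by fuel
  decreasing_by omega

def pvFuelB : Nat := 2147483648 + 64

def solution_alt (arr : List Int) : Int :=
  arr.foldl (fun best num =>
    let c := pvChain pvFuelB num 0
    if c > best then c else best) 0

-- ===== PRECONDITION & SPEC =====
-- Pre_ excludes arrays containing an odd element ≤ -3: on those the Python A (and B)
-- never returns — 2*n+1 stays odd and below -1, so the loop runs forever (-1 itself is a
-- fixed point of 2*n+1, so it is admitted).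
def Pre_solution (arr : List Int) : Prop := ∀ a ∈ arr, 0 ≤ a ∨ a % 2 = 0 ∨ a = -1
instance (arr : List Int) : Decidable (Pre_solution arr) := by unfold Pre_solution; infer_instance
def pvWitness_solution : List Int := [56, 3, 0, -4, -1]

def Spec_solution (arr : List Int) (out : Int) : Prop := out = solution_alt arr
instance (arr : List Int) (out : Int) : Decidable (Spec_solution arr out) := by unfold Spec_solution; infer_instance

-- ===== CLAIM (what is proved, stated in full; the proofs are below) =====
def Claim_equal_solution : Prop := ∀ (arr : List Int), Dom_solution arr → Pre_solution arr → Spec_solution arr (solution arr)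

-- ===== LEMMAS AND PROOFS =====

def pvOk (n : Int) : Prop := 0 ≤ n ∨ n % 2 = 0 ∨ n = -1

theorem pvMod_two (n : Int) : PySem.Int.mod n 2 = n % 2 :=
  PySem.Int.mod_eq_emod_of_pos (by omega)

theorem pvFloordiv_two (n : Int) : PySem.Int.floordiv n 2 = n / 2 :=
  PySem.Int.floordiv_eq_ediv_of_pos (by omega)

-- termination measure for one element's chain
def pvMu (n : Int) : Nat :=
  if ((50 ≤ n ∧ PySem.Int.mod n 2 = 0) ∨ (0 ≤ n ∧ n < 50 ∧ PySem.Int.mod n 2 = 1)) then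
    (if 50 ≤ n then n.toNat else (50 - n).toNat)
  else 0

theorem pvStep_ok {n : Int} (hok : pvOk n) : pvOk (pvStep n) := by
  unfold pvOk pvStep at *
  simp only [pvMod_two, pvFloordiv_two]
  split_ifs <;> omega

theorem pvMu_pos {n : Int} (hok : pvOk n) (h : pvStep n ≠ n) : 0 < pvMu n := by
  unfold pvOk at hok
  unfold pvStep at h
  unfold pvMu
  simp only [pvMod_two, pvFloordiv_two] at *
  split_ifs at * <;> omega

theorem pvMu_decrease {n : Int} (hok : pvOk n) (h : pvStep n ≠ n) :
    pvMu (pvStep n) < pvMu n := by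
  unfold pvOk at hok
  unfold pvStep at *
  unfold pvMu
  simp only [pvMod_two, pvFloordiv_two] at *
  split_ifs at * <;> omega

-- pvChain: unfolding lemmas (the 'nxt' of pvChain is definitionally pvStep)
theorem pvChain_eq (f : Nat) (n c : Int) :
    pvChain f n c =
      if f = 0 then c else if pvStep n = n then c else pvChain (f - 1) (pvStep n) (c + 1) := by
  rw [pvChain]
  simp only [pvStep]

theorem pvChain_stop {n : Int} (h : pvStep n = n) (f : Nat) (c : Int) :
    pvChain f n c = c := by
  rw [pvChain_eq]
  split_ifs <;> rfl

theorem pvChain_go {n : Int} (h : pvStep n ≠ n) {f : Nat} (hf : f ≠ 0) (c : Int) :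
    pvChain f n c = pvChain (f - 1) (pvStep n) (c + 1) := by
  rw [pvChain_eq, if_neg hf, if_neg h]

theorem pvMu_zero {n : Int} (h : pvStep n = n) : pvMu n = 0 := by
  unfold pvStep at h
  unfold pvMu
  simp only [pvMod_two, pvFloordiv_two] at *
  split_ifs at * <;> omega

theorem pvChain_shift (f : Nat) (n : Int) (c : Int) :
    pvChain f n (c + 1) = pvChain f n c + 1 := by
  induction f using Nat.strong_induction_on generalizing n c with
  | _ f ih =>
    by_cases h : pvStep n = n
    · rw [pvChain_stop h, pvChain_stop h]
    · rcases Nat.eq_zero_or_pos f with hf | hf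
      · subst hf
        conv_lhs => rw [pvChain_eq]
        conv_rhs => rw [pvChain_eq]
        simp
      · rw [pvChain_go h (by omega), pvChain_go h (by omega), ih (f - 1) (by omega)]

theorem pvChain_fuel : ∀ (m : Nat) {n : Int}, pvOk n → pvMu n ≤ m →
    ∀ {f g : Nat}, pvMu n ≤ f → pvMu n ≤ g → pvChain f n 0 = pvChain g n 0 := by
  intro m
  induction m with
  | zero =>
    intro n hok hm f g hf hg
    by_cases h : pvStep n = n
    · rw [pvChain_stop h, pvChain_stop h]
    · exact absurd hm (by have := pvMu_pos hok h; omega)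
  | succ m ih =>
    intro n hok hm f g hf hg
    by_cases h : pvStep n = n
    · rw [pvChain_stop h, pvChain_stop h]
    · have hpos := pvMu_pos hok h
      have hdec := pvMu_decrease hok h
      rw [pvChain_go h (by omega), pvChain_go h (by omega),
        pvChain_shift, pvChain_shift,
        ih (pvStep_ok hok) (by omega) (f := f - 1) (g := g - 1) (by omega) (by omega)]

theorem pvChain_nonneg (f : Nat) (n : Int) : 0 ≤ pvChain f n 0 := by
  induction f using Nat.strong_induction_on generalizing n with
  | _ f ih =>
    by_cases h : pvStep n = n
    · rw [pvChain_stop h]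
    · rcases Nat.eq_zero_or_pos f with hf | hf
      · subst hf; rw [pvChain_eq]; simp
      · rw [pvChain_go h (by omega), pvChain_shift]
        have := ih (f - 1) (by omega) (pvStep n)
        omega

-- c(n) := the chain length B computes for one element
def pvC (n : Int) : Int := pvChain pvFuelB n 0

theorem pvC_stable {n : Int} (h : pvStep n = n) : pvC n = 0 := pvChain_stop h _ _

theorem pvC_unstable {n : Int} (hok : pvOk n) (hmu : pvMu n ≤ pvFuelB) (h : pvStep n ≠ n) :
    pvC n = 1 + pvC (pvStep n) := by
  have hdec := pvMu_decrease hok h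
  unfold pvC
  rw [pvChain_go h (by unfold pvFuelB; omega), pvChain_shift,
    pvChain_fuel (pvMu (pvStep n)) (pvStep_ok hok) le_rfl
      (f := pvFuelB - 1) (g := pvFuelB) (by omega) (by omega)]
  omega

-- fm arr = B's fold
def pvFm (arr : List Int) : Int := arr.foldl (fun b a => if pvC a > b then pvC a else b) 0

theorem pvFm_eq_alt (arr : List Int) : solution_alt arr = pvFm arr := rfl

theorem pvIfmax (b c : Int) : (if c > b then c else b) = max b c := by
  rw [max_def]; split_ifs <;> omega

theorem pvFoldl_max_init (l : List Int) (x y : Int) :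
    l.foldl (fun b a => max b (pvC a)) (max x y) =
      max x (l.foldl (fun b a => max b (pvC a)) y) := by
  induction l generalizing y with
  | nil => simp
  | cons a t ih => simp only [List.foldl_cons, max_assoc]; exact ih (max y (pvC a))

theorem pvFm_cons (a : Int) (t : List Int) : pvFm (a :: t) = max (pvC a) (pvFm t) := by
  unfold pvFm
  simp only [pvIfmax, List.foldl_cons]
  have h0 : max (0 : Int) (pvC a) = max (pvC a) 0 := max_comm _ _
  rw [h0, pvFoldl_max_init]

theorem pvFm_nonneg (arr : List Int) : 0 ≤ pvFm arr := by
  induction arr with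
  | nil => simp [pvFm]
  | cons a t ih => rw [pvFm_cons]; have := pvChain_nonneg pvFuel a; unfold pvC; omega

theorem pvFm_all_stable {arr : List Int} (h : ∀ a ∈ arr, pvStep a = a) : pvFm arr = 0 := by
  induction arr with
  | nil => simp [pvFm]
  | cons a t ih =>
    rw [pvFm_cons, pvC_stable (h a (by simp)), ih (fun a ha => h a (by simp [ha]))]
    simp

theorem pvMap_all_stable {arr : List Int} (h : ∀ a ∈ arr, pvStep a = a) :
    arr.map pvStep = arr := by
  induction arr with
  | nil => rfl
  | cons a t ih =>
    simp only [List.map_cons, h a (by simp), ih (fun a ha => h a (by simp [ha]))]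

-- one parallel round shifts the max chain length down by exactly one
theorem pvFm_step {arr : List Int} (hok : ∀ a ∈ arr, pvOk a ∧ pvMu a ≤ pvFuelB)
    (h : ¬ ∀ a ∈ arr, pvStep a = a) : pvFm arr = 1 + pvFm (arr.map pvStep) := by
  induction arr with
  | nil => simp at h
  | cons a t ih =>
    obtain ⟨hoka, hmua⟩ := hok a (by simp)
    rw [pvFm_cons, List.map_cons, pvFm_cons]
    by_cases ha : pvStep a = a
    · have ht : ¬ ∀ b ∈ t, pvStep b = b := fun hc => h (by
        intro b hb
        rcases List.mem_cons.1 hb with rfl | hb'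
        · exact ha
        · exact hc b hb')
      rw [ha, pvC_stable ha,
        max_eq_right (pvFm_nonneg t), max_eq_right (pvFm_nonneg (t.map pvStep)),
        ih (fun b hb => hok b (by simp [hb])) ht]
    · rw [pvC_unstable hoka hmua ha]
      by_cases ht : ∀ b ∈ t, pvStep b = b
      · rw [pvMap_all_stable ht, pvFm_all_stable ht]
        have hcc : 0 ≤ pvC (pvStep a) := pvChain_nonneg _ _
        rw [max_eq_left (by omega), max_eq_left hcc]
      · rw [ih (fun b hb => hok b (by simp [hb])) ht, max_add_add_left]

-- main loop invariant: A's remaining loop returns x + (max chain length of arr)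
theorem pvLoopA_eq (f : Nat) :
    ∀ (arr : List Int) (x : Int),
      (∀ a ∈ arr, pvOk a ∧ pvMu a ≤ f ∧ pvMu a ≤ pvFuelB) →
      pvLoopA f arr x = x + pvFm arr := by
  induction f using Nat.strong_induction_on with
  | _ f ih =>
    intro arr x hok
    rcases Nat.eq_zero_or_pos f with hf | hf
    · subst hf
      rw [pvLoopA, if_pos rfl,
        pvFm_all_stable (fun a ha => by
          obtain ⟨h1, h2, _⟩ := hok a ha
          by_contra hu
          exact absurd h2 (by have := pvMu_pos h1 hu; omega))]
      omega
    · rw [pvLoopA, if_neg (by omega)]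
      by_cases heq : arr.map pvStep = arr
      · rw [if_pos heq]
        have hst : ∀ a ∈ arr, pvStep a = a := by
          intro a ha
          obtain ⟨i, hi, rfl⟩ := List.mem_iff_getElem.1 ha
          have := congrArg (fun l => l[i]?) heq
          simpa [List.getElem?_map, List.getElem?_eq_getElem hi] using this
        rw [pvFm_all_stable hst]; omega
      · rw [if_neg heq]
        have hsome : ¬ ∀ a ∈ arr, pvStep a = a := by
          intro hc; exact heq (pvMap_all_stable hc)
        have hok' : ∀ b ∈ arr.map pvStep, pvOk b ∧ pvMu b ≤ f - 1 ∧ pvMu b ≤ pvFuelB := by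
          intro b hb
          obtain ⟨a, ha, rfl⟩ := List.mem_map.1 hb
          obtain ⟨h1, h2, h3⟩ := hok a ha
          by_cases hu : pvStep a = a
          · rw [hu]
            exact ⟨h1, by have := pvMu_zero hu; omega, h3⟩
          · have hd := pvMu_decrease h1 hu
            exact ⟨pvStep_ok h1, by omega, by omega⟩
        rw [ih (f - 1) (by omega) _ _ hok',
          pvFm_step (fun a ha => ⟨(hok a ha).1, (hok a ha).2.2⟩) hsome]
        omega

-- ===== VERDICT (by name: the statement is the Claim_ definition above) =====
theorem solution_spec : Claim_equal_solution := by
  intro arr hdom hpre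
  unfold Spec_solution solution
  rw [pvFm_eq_alt]
  have hok : ∀ a ∈ arr, pvOk a ∧ pvMu a ≤ pvFuel ∧ pvMu a ≤ pvFuelB := by
    intro a ha
    have hd : pvDomInt a = true := by
      unfold Dom_solution at hdom
      rw [List.all_eq_true] at hdom
      exact hdom a ha
    unfold pvDomInt at hd
    have hb : -2147483648 ≤ a ∧ a ≤ 2147483648 := by simpa using hd
    refine ⟨hpre a ha, ?_, ?_⟩ <;>
    · simp only [pvMu, pvFuel, pvFuelB]
      split_ifs <;> omega
  rw [pvLoopA_eq pvFuel arr 0 hok]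
  omega
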